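-- pv_equiv track=rewrite | github.com/gongbu22/programmers | 프로그래머스/0/181904. 세로 읽기/세로 읽기.py | solution
-- ===== SOURCE A (Python) =====
-- def solution(my_string, m, c):
--     first=[]
--     result =''
--     for i in range(0, len(my_string), m):
--         first.append(my_string[i:i+m])
--     for j in first:
--         result += j[c-1:c]
--     return result
-- ===== SOURCE B (Python) =====
-- def solution(my_string, m, c):
--     # read column c (1-based) directly with a stride slice; out-of-range column -> ''
--     if 1 <= c <= m:
--         return my_string[c - 1::m]
--     return ''
-- ===== Notes on version B (the rewrite author's own statement) =====
-- stated objective: idiomatic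
-- what changed: Replaces building the list of m-sized rows and concatenating a one-character slice of each with a single stride slice my_string[c-1::m] guarded by an explicit 1<=c<=m column-range check.
-- intended difference: For nonpositive column numbers whose negative slice index still lands inside a row (c <= -1 and 1-c <= min(m, len(my_string))) A returns characters read from the right end of each ragged row via Python's negative slice indices, while B returns '' because a 1-based column number below 1 is out of range, which is the intended reading of the task. — e.g. on solution("abcd", 2, -1): A returns "ac", B returns ""
import Mathlib
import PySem

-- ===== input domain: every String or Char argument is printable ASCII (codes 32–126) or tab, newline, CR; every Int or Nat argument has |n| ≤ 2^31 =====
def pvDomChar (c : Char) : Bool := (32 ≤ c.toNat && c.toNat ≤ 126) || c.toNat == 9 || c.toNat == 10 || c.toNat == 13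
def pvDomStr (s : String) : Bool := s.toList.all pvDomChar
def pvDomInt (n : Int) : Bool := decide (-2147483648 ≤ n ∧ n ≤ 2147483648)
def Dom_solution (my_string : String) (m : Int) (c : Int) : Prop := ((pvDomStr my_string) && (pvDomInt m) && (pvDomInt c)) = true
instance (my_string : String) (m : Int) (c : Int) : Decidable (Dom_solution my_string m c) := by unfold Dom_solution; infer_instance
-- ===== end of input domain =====

-- B replaces A's row-splitting loop + per-row one-character slices with a single stride slice
-- my_string[c-1::m] behind an explicit 1 ≤ c ≤ m column-range check (idiomatic; return value only).

-- ===== PORT A =====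
def solution (my_string : String) (m : Int) (c : Int) : String :=
  let first : List String :=
    (PySem.List.pyRange 0 (PySem.Str.len my_string) m).foldl
      (fun acc i => acc ++ [PySem.Str.slice my_string (some i) (some (i + m))]) []
  first.foldl (fun result j => result ++ PySem.Str.slice j (some (c - 1)) (some c)) ""

-- ===== PORT B =====
def solution_alt (my_string : String) (m : Int) (c : Int) : String :=
  if 1 ≤ c ∧ c ≤ m then
    -- my_string[c-1::m]; the step m is nonzero inside the guard, so slice? is always `some`
    (PySem.Str.slice? my_string (some (c - 1)) none m).getD ""
  else ""

-- ===== PRECONDITION & SPEC =====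
-- Pre_ excludes only m = 0, on which A raises ValueError (range() arg 3 must not be zero).
def Pre_solution (my_string : String) (m : Int) (c : Int) : Prop := m ≠ 0
instance (my_string : String) (m : Int) (c : Int) : Decidable (Pre_solution my_string m c) := by
  unfold Pre_solution; infer_instance
def pvWitness_solution : String × Int × Int := ("abcdef", 2, 1)

-- For nonpositive column numbers whose negative slice index still lands inside a row
-- (c ≤ -1 and 1-c ≤ min(m, len(my_string))) A returns characters read from the right end of each
-- ragged row via Python's negative slice indices, while B returns '' because a 1-based column
-- number below 1 is out of range, which is the intended reading of the task.
def D_solution (my_string : String) (m : Int) (c : Int) : Prop :=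
  c ≤ -1 ∧ 1 - c ≤ min m (PySem.Str.len my_string)
instance (my_string : String) (m : Int) (c : Int) : Decidable (D_solution my_string m c) := by
  unfold D_solution; infer_instance

def Spec_solution (my_string : String) (m : Int) (c : Int) (out : String) : Prop :=
  ¬ D_solution my_string m c → out = solution_alt my_string m c
instance (my_string : String) (m : Int) (c : Int) (out : String) : Decidable (Spec_solution my_string m c out) := by
  unfold Spec_solution; infer_instance

def pvDiffWitness_solution : String × Int × Int := ("abcd", 2, -1)
def pvDiffWitnessOut_solution : String × String := ("ac", "")

-- ===== CLAIM (what is proved, stated in full; the proofs are below) =====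
def Claim_unchanged_solution : Prop := ∀ (my_string : String) (m : Int) (c : Int), Dom_solution my_string m c → Pre_solution my_string m c → Spec_solution my_string m c (solution my_string m c)
def Claim_changed_solution : Prop := Dom_solution (pvDiffWitness_solution.1) (pvDiffWitness_solution.2.1) (pvDiffWitness_solution.2.2) ∧ Pre_solution (pvDiffWitness_solution.1) (pvDiffWitness_solution.2.1) (pvDiffWitness_solution.2.2) ∧ D_solution (pvDiffWitness_solution.1) (pvDiffWitness_solution.2.1) (pvDiffWitness_solution.2.2) ∧ solution (pvDiffWitness_solution.1) (pvDiffWitness_solution.2.1) (pvDiffWitness_solution.2.2) = pvDiffWitnessOut_solution.1 ∧ solution_alt (pvDiffWitness_solution.1) (pvDiffWitness_solution.2.1) (pvDiffWitness_solution.2.2) = pvDiffWitnessOut_solution.2 ∧ pvDiffWitnessOut_solution.1 ≠ pvDiffWitnessOut_solution.2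
def Claim_exact_solution : Prop := ∀ (my_string : String) (m : Int) (c : Int), Dom_solution my_string m c → Pre_solution my_string m c → D_solution my_string m c → solution my_string m c ≠ solution_alt my_string m c


-- ===== LEMMAS AND PROOFS =====

-- A's result at the character-list level: rows l[i:i+m] for i in range(0,len,m), then the
-- (c-1:c) slice of each row, concatenated.
def Achars (l : List Char) (m c : Int) : List Char :=
  (PySem.List.pyRange 0 (l.length : Int) m).flatMap
    (fun i => PySem.List.slice (PySem.List.slice l (some i) (some (i + m))) (some (c - 1)) (some c))

-- B's stride slice at the character-list level.
def Bchars (l : List Char) (m c : Int) : List Char :=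
  (PySem.List.slice? l (some (c - 1)) none m).getD []

theorem foldl_str_append {α : Type} (f : α → String) (l : List α) (init : String) :
    (l.foldl (fun r x => r ++ f x) init).toList = init.toList ++ l.flatMap (fun x => (f x).toList) := by
  induction l generalizing init with
  | nil => simp
  | cons x xs ih => simp [List.foldl, ih]

theorem solution_toList (s : String) (m c : Int) :
    (solution s m c).toList = Achars s.toList m c := by
  unfold solution Achars
  rw [PySem.List.foldl_append_singleton_eq_map, List.nil_append, foldl_str_append]
  simp [PySem.Str.slice, PySem.Chars.slice, PySem.Str.len, List.flatMap_map]

theorem solution_alt_toList (s : String) (m c : Int) :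
    (solution_alt s m c).toList =
      if 1 ≤ c ∧ c ≤ m then Bchars s.toList m c else [] := by
  unfold solution_alt Bchars
  split
  · simp only [PySem.Str.slice?, PySem.Chars.slice?]
    cases PySem.List.slice? s.toList (some (c - 1)) none m <;> simp
  · simp

-- range(a,b,s) with positive step, cons form
theorem pyRange_pos_cons {a b s : Int} (hs : 0 < s) (hab : a < b) :
    PySem.List.pyRange a b s = a :: PySem.List.pyRange (a + s) b s := by
  have hs0 : s ≠ 0 := by omega
  rw [PySem.List.pyRange_of_pos _ _ hs, PySem.List.pyRange_of_pos _ _ hs]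
  rw [if_pos hab]
  have hkey : (b - a + s - 1) / s = (b - (a + s) + s - 1) / s + 1 := by
    have h1 : b - a + s - 1 = (b - (a + s) + s - 1) + 1 * s := by ring
    rw [h1, Int.add_mul_ediv_right _ _ hs0]
  by_cases h2 : a + s < b
  · rw [if_pos h2]
    have hnn : 0 ≤ (b - (a + s) + s - 1) / s := Int.ediv_nonneg (by omega) (by omega)
    have hnat : ((b - a + s - 1) / s).toNat = ((b - (a + s) + s - 1) / s).toNat + 1 := by omega
    rw [hnat, List.range_succ_eq_map]
    simp only [List.map_cons, List.map_map]
    congr 1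
    · push_cast; ring
    · apply List.map_congr_left; intro k _; simp only [Function.comp_apply]; push_cast; ring
  · rw [if_neg h2]
    have hz : (b - (a + s) + s - 1) / s = 0 := by
      apply Int.ediv_eq_zero_of_lt <;> omega
    have hnat : ((b - a + s - 1) / s).toNat = 1 := by omega
    rw [hnat]
    simp [List.range_one]

-- range(a+s,b,s) is the shifted range(a,b-s,s)
theorem pyRange_pos_shift {a b s : Int} (hs : 0 < s) :
    PySem.List.pyRange (a + s) b s = (PySem.List.pyRange a (b - s) s).map (· + s) := by
  rw [PySem.List.pyRange_of_pos _ _ hs, PySem.List.pyRange_of_pos _ _ hs]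
  have h2 : (if a + s < b then ((b - (a + s) + s - 1) / s).toNat else 0)
      = (if a < b - s then (b - s - a + s - 1) / s |>.toNat else 0) := by
    by_cases h : a + s < b
    · rw [if_pos h, if_pos (by omega)]
      congr 2
      ring
    · rw [if_neg h, if_neg (by omega)]
  rw [h2]
  simp only [List.map_map]
  apply List.map_congr_left; intro k _; simp only [Function.comp_apply]; ring

-- l[(i+m):(i+m)+m] = (l drop m)[i:i+m]  for 0 ≤ i, 0 ≤ m
theorem slice_shift (l : List Char) {i m : Int} (hi : 0 ≤ i) (hm : 0 ≤ m) :
    PySem.List.slice l (some (i + m)) (some (i + m + m)) =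
      PySem.List.slice (l.drop m.toNat) (some i) (some (i + m)) := by
  rw [PySem.List.slice_toNat _ (by omega) (by omega), PySem.List.slice_toNat _ hi (by omega)]
  rw [List.drop_drop]
  have h1 : (i + m + m).toNat - (i + m).toNat = (i + m).toNat - i.toNat := by omega
  have h2 : (i + m).toNat = m.toNat + i.toNat := by omega
  rw [h1, h2]

theorem flatMap_congr_mem {α β : Type} {l : List α} {f g : α → List β}
    (h : ∀ x ∈ l, f x = g x) : l.flatMap f = l.flatMap g := by
  induction l with
  | nil => rfl
  | cons x xs ih =>
    simp only [List.flatMap_cons, h x (by simp)]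
    rw [ih (fun y hy => h y (by simp [hy]))]

theorem filterMap_congr_mem {α β : Type} {l : List α} {f g : α → Option β}
    (h : ∀ x ∈ l, f x = g x) : l.filterMap f = l.filterMap g := by
  induction l with
  | nil => rfl
  | cons x xs ih =>
    simp only [List.filterMap_cons, h x (by simp)]
    rw [ih (fun y hy => h y (by simp [hy]))]

-- r[c-1:c] for 1 ≤ c is the optional element r[c-1]
theorem row_piece (r : List Char) {c : Int} (hc : 1 ≤ c) :
    PySem.List.slice r (some (c - 1)) (some c) = (r[(c - 1).toNat]?).toList := by
  rw [PySem.List.slice_toNat _ (by omega) (by omega)]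
  have h1 : c.toNat - (c - 1).toNat = 1 := by omega
  rw [h1]
  generalize (c - 1).toNat = j
  rcases Nat.lt_or_ge j r.length with h | h
  · rw [List.drop_eq_getElem_cons h, List.take_succ_cons, List.take_zero,
      List.getElem?_eq_getElem h, Option.toList_some]
  · rw [List.drop_eq_nil_of_le h, List.getElem?_eq_none h]
    rfl

theorem Achars_cons {l : List Char} {m c : Int} (hm : 0 < m) (hl : l ≠ []) :
    Achars l m c =
      PySem.List.slice (PySem.List.slice l (some 0) (some m)) (some (c - 1)) (some c)
        ++ Achars (l.drop m.toNat) m c := by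
  have hL : (0:Int) < (l.length : Int) := by
    have := List.length_pos_iff.mpr hl; omega
  unfold Achars
  rw [pyRange_pos_cons hm hL, List.flatMap_cons]
  congr 1
  · norm_num
  · have hsh := pyRange_pos_shift (a := 0) (b := (l.length : Int)) hm
    rw [show (0:Int) + m = m from by ring] at hsh
    rw [zero_add, hsh, List.flatMap_map]
    by_cases hml : m ≤ (l.length : Int)
    · have hlen : ((l.drop m.toNat).length : Int) = (l.length : Int) - m := by
        simp [List.length_drop]; omega
      rw [hlen]
      apply flatMap_congr_mem
      intro i hi
      have hi0 : 0 ≤ i := ((PySem.List.mem_pyRange_iff_of_pos hm i).mp hi).1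
      rw [slice_shift l hi0 (by omega)]
    · have hd : l.drop m.toNat = [] := List.drop_eq_nil_of_le (by omega)
      rw [hd]
      rw [PySem.List.pyRange_of_pos _ _ hm, PySem.List.pyRange_of_pos _ _ hm]
      rw [if_neg (by omega), if_neg (by simp)]
      simp

-- s[j::m] for positive step m and 0 ≤ j, evaluated
theorem slice?_pos_eval (l : List Char) (j m : Int) (hm : 0 < m) (hj : 0 ≤ j) :
    PySem.List.slice? l (some j) none m =
      some (List.filterMap (fun k => l[(min j (l.length:Int) + m * (k:Nat)).toNat]?)
        (List.range (if min j (l.length:Int) < (l.length:Int)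
          then (((l.length:Int) - min j (l.length:Int) + m - 1)/m).toNat else 0))) := by
  simp only [PySem.List.slice?, PySem.List.sliceIndices]
  rw [if_neg (by omega : ¬ m = 0)]
  simp only [if_neg (by omega : ¬ m < 0), if_neg (by omega : ¬ j < 0), if_pos hm]

theorem Bchars_nil {l : List Char} {m c : Int} (hm : 0 < m) (hc : 1 ≤ c)
    (h : (l.length : Int) ≤ c - 1) : Bchars l m c = [] := by
  unfold Bchars
  rw [slice?_pos_eval l (c-1) m hm (by omega)]
  rw [min_eq_right h, if_neg (by omega)]
  simp

theorem Bchars_cons {l : List Char} {m c : Int} (hm : 0 < m) (hc : 1 ≤ c)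
    (h : c - 1 < (l.length : Int)) :
    Bchars l m c = (l[(c - 1).toNat]?).toList ++ Bchars (l.drop m.toNat) m c := by
  unfold Bchars
  rw [slice?_pos_eval l (c-1) m hm (by omega)]
  rw [min_eq_left (by omega)]
  rw [if_pos h]
  set L : Int := (l.length : Int) with hL
  have hcnt1 : (1:Int) ≤ (L - (c-1) + m - 1)/m := by
    rw [Int.le_ediv_iff_mul_le hm]; omega
  have hcnt : ((L - (c-1) + m - 1)/m).toNat = ((L - (c-1) + m - 1)/m - 1).toNat + 1 := by omega
  rw [hcnt, List.range_succ_eq_map]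
  have hsome : (fun k : Nat => l[(c - 1 + m * (k:Int)).toNat]?) 0
      = some (l[(c-1).toNat]'(by omega)) := by
    simp only [Nat.cast_zero, mul_zero, add_zero]
    exact List.getElem?_eq_getElem (by omega)
  rw [Option.getD_some,
    List.filterMap_cons_some (f := fun k : Nat => l[(c - 1 + m * (k:Int)).toNat]?) (h := hsome)]
  have hsome2 : l[(c-1).toNat]? = some (l[(c-1).toNat]'(by omega)) :=
    List.getElem?_eq_getElem (by omega)
  rw [hsome2, Option.toList_some]
  congr 1
  rw [List.filterMap_map]
  have hdl : ((l.drop m.toNat).length : Int) = max (L - m) 0 := by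
    simp [List.length_drop]; omega
  rw [slice?_pos_eval (l.drop m.toNat) (c-1) m hm (by omega), Option.getD_some, hdl]
  by_cases hcase : c - 1 < max (L - m) 0
  · rw [min_eq_left (by omega), if_pos hcase]
    have hmax : max (L - m) 0 = L - m := by omega
    rw [hmax]
    have hcnteq : ((L - (c-1) + m - 1)/m - 1).toNat = ((L - m - (c-1) + m - 1)/m).toNat := by
      have : L - (c-1) + m - 1 = (L - m - (c-1) + m - 1) + 1 * m := by ring
      rw [this, Int.add_mul_ediv_right _ _ (by omega : m ≠ 0)]
      omega
    rw [hcnteq]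
    apply filterMap_congr_mem
    intro k _
    simp only [Function.comp_apply]
    have hk0 : (0:Int) ≤ m * (k:Int) := by positivity
    have hsucc : ((k:Nat).succ : Int) = (k:Int) + 1 := by push_cast; ring
    rw [List.getElem?_drop]
    congr 1
    have : m * ((k:Int) + 1) = m * (k:Int) + m := by ring
    rw [hsucc, this]
    omega
  · -- dropped list too short: both sides empty
    rw [if_neg (by omega)]
    have hone : (L - (c-1) + m - 1)/m = 1 := by
      have hlt : (L - (c-1) + m - 1)/m < 2 := by
        rw [Int.ediv_lt_iff_lt_mul hm]; omega
      omega
    rw [hone]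
    simp

theorem clampIdx_nonneg_eq (n : Nat) {t : Int} (ht : 0 ≤ t) :
    PySem.List.clampIdx n t = min t.toNat n := by
  simp only [PySem.List.clampIdx, if_neg (by omega : ¬ t < 0)]

-- rows have length ≤ min(m, len l); if every such row slices to [], A is ''
theorem Achars_nil {l : List Char} {m c : Int} (hm : 0 < m)
    (h : ∀ n : Nat, (n : Int) ≤ min m (l.length : Int) →
      PySem.List.clampIdx n c ≤ PySem.List.clampIdx n (c - 1)) :
    Achars l m c = [] := by
  unfold Achars
  rw [List.flatMap_eq_nil_iff]
  intro i hi
  have hi0 : 0 ≤ i := ((PySem.List.mem_pyRange_iff_of_pos hm i).mp hi).1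
  apply List.length_eq_zero_iff.mp
  rw [PySem.List.length_slice]
  apply Nat.sub_eq_zero_of_le
  apply h
  rw [PySem.List.length_slice, clampIdx_nonneg_eq _ hi0, clampIdx_nonneg_eq _ (by omega)]
  have h1 : (i + m).toNat = i.toNat + m.toNat := by omega
  omega

-- range(0, len, m) is empty for a negative step
theorem Achars_neg_step {l : List Char} {m c : Int} (hm : m < 0) : Achars l m c = [] := by
  unfold Achars
  have hr : PySem.List.pyRange 0 (l.length : Int) m = [] := by
    simp only [PySem.List.pyRange, if_neg (by omega : ¬ m = 0), if_neg (by omega : ¬ (0:Int) < m),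
      if_neg (by omega : ¬ (l.length : Int) < 0)]
    simp
  rw [hr]
  rfl

theorem master {m c : Int} (hm : 0 < m) (hc1 : 1 ≤ c) (hcm : c ≤ m) :
    ∀ (n : Nat) (l : List Char), l.length ≤ n → Achars l m c = Bchars l m c := by
  intro n
  induction n with
  | zero =>
    intro l hl
    have hnil : l = [] := by
      cases l with
      | nil => rfl
      | cons x xs => simp at hl
    subst hnil
    rw [Bchars_nil hm hc1 (by simp; omega)]
    unfold Achars
    rw [PySem.List.pyRange_of_pos _ _ hm, if_neg (by simp)]
    simp
  | succ n ih =>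
    intro l hl
    by_cases hL : c - 1 < (l.length : Int)
    · have hlne : l ≠ [] := by
        intro e; subst e; simp at hL; omega
      rw [Achars_cons hm hlne, Bchars_cons hm hc1 hL]
      congr 1
      · rw [row_piece _ hc1]
        congr 1
        rw [PySem.List.slice_zero_start, PySem.List.slice_to _ (by omega)]
        exact List.getElem?_take_of_lt (by omega)
      · apply ih
        have hd : (l.drop m.toNat).length = l.length - m.toNat := List.length_drop ..
        have hlp : 0 < l.length := List.length_pos_iff.mpr hlne
        omega
    · rw [Bchars_nil hm hc1 (by omega)]
      apply Achars_nil hm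
      intro nr hnr
      rw [clampIdx_nonneg_eq _ (by omega), clampIdx_nonneg_eq _ (by omega)]
      omega

-- ===== VERDICT (by name: the statement is the Claim_ definition above) =====
theorem solution_spec : Claim_unchanged_solution := by
  intro s m c _ hpre hnd
  show solution s m c = solution_alt s m c
  have hpre' : m ≠ 0 := hpre
  apply String.toList_inj.mp
  rw [solution_toList, solution_alt_toList]
  by_cases hmpos : 0 < m
  · by_cases hg : 1 ≤ c ∧ c ≤ m
    · rw [if_pos hg]
      exact master hmpos hg.1 hg.2 s.toList.length _ le_rfl
    · rw [if_neg hg]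
      apply Achars_nil hmpos
      intro nr hnr
      have hnd' : ¬ (c ≤ -1 ∧ 1 - c ≤ min m ((s.toList.length : Nat) : Int)) := hnd
      simp only [not_and, not_le] at hnd' hg
      simp only [PySem.List.clampIdx]
      split_ifs <;> omega
  · have hmneg : m < 0 := by omega
    rw [Achars_neg_step hmneg, if_neg (by rintro ⟨h1, h2⟩; omega)]

theorem solution_changed : Claim_changed_solution := by
  unfold Claim_changed_solution; decide

theorem solution_tight : Claim_exact_solution := by
  intro s m c _ _ hD
  have hD' : c ≤ -1 ∧ 1 - c ≤ min m ((s.toList.length : Nat) : Int) := hD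
  obtain ⟨hc, hmin⟩ := hD'
  have hm : 0 < m := by omega
  have hL2 : (2:Int) ≤ (s.toList.length : Int) := by omega
  intro heq
  have hts := congrArg String.toList heq
  rw [solution_toList, solution_alt_toList, if_neg (by rintro ⟨h1, _⟩; omega)] at hts
  have hlne : s.toList ≠ [] := by
    intro e; rw [e] at hL2; simp at hL2
  rw [Achars_cons hm hlne] at hts
  have hhead := (List.append_eq_nil_iff.mp hts).1
  have hlen := congrArg List.length hhead
  rw [PySem.List.length_slice, PySem.List.slice_zero_start,
    PySem.List.slice_to _ (by omega)] at hlen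
  simp only [List.length_take, List.length_nil] at hlen
  simp only [PySem.List.clampIdx] at hlen
  split_ifs at hlen <;> omega
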